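-- pv_equiv track=rewrite | github.com/BlueSkyAndSomeCurses/catalan_numbers_discrete | main.py | catalan_powers
-- ===== SOURCE A (Python) =====
-- def catalan_powers(x, numb):
--     def factorial(m):
--         """
--         factorial
--         """
--         if m == 0:
--             return 1
--         return m * factorial(m - 1)
--
--     def ceshka(n, k):
--         """
--         Counts number of nth number by ceshka
--         """
--         return factorial(n) // (factorial(k) * factorial(n - k))
--
--     def counted_catalan_number(n):
--         """
--         Counts by fromula of counting C(n) = (1/(n+1)) * C(2 * n, n)
--         """
--         return ceshka(2 * n, n) // (n + 1)
--
--     def catalan_power_series_method(x, numb_of_first_terms):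
--         """
--         Finds sum of n terms.
--         """
--         series = [
--             counted_catalan_number(n) * (x**n) for n in range(numb_of_first_terms)
--         ]
--         return sum(series)
--
--     return catalan_power_series_method(x, numb)
-- ===== SOURCE B (Python) =====
-- def catalan_powers(x, numb):
--     # One pass: update the Catalan number by its recurrence and the power of x
--     # incrementally, instead of recomputing factorials for every term.
--     total = 0
--     c = 1
--     p = 1
--     for n in range(numb):
--         total += c * p
--         c = c * 2 * (2 * n + 1) // (n + 2)
--         p *= x
--     return total
-- ===== Notes on version B (the rewrite author's own statement) =====
-- stated objective: faster
-- what changed: Replaces per-term recomputation of three factorials (recursive factorial, binomial, division) with a single accumulating loop that updates the Catalan number via C(n+1)=C(n)*2*(2n+1)//(n+2) and the power x**n by one multiplication per step; intended as faster (O(numb) vs O(numb^2) bigint ops), a timing run measured B 50-80x faster at the largest sizes both finished (n<=1024; at n=4096 the bigint results are astronomically large and both can time out).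
import Mathlib
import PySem

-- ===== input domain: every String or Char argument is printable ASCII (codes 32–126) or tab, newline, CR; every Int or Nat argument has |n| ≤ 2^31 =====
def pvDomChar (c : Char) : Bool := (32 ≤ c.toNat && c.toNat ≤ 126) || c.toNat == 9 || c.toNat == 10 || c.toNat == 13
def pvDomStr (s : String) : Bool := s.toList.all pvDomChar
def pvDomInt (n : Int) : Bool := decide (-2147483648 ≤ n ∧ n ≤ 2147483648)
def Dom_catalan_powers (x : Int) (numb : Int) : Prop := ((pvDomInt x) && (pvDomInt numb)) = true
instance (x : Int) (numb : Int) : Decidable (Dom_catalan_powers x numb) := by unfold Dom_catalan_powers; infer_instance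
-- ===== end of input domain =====

-- B replaces A's per-term factorial recomputation with one accumulating pass updating the
-- Catalan number by its recurrence and the power of x; intended as faster (fewer bigint ops
-- per term); a timing run measured B 50-80x faster at the largest sizes both finished.

-- ===== PORT A =====
-- A's recursive factorial; it is only ever called with nonnegative arguments,
-- so it is ported on Nat (exact on all calls A makes).
def factA : Nat → Int
  | 0 => 1
  | m + 1 => ((m : Int) + 1) * factA m

def ceshkaA (n k : Nat) : Int :=
  PySem.Int.floordiv (factA n) (factA k * factA (n - k))

def countedCatalanA (n : Nat) : Int :=
  PySem.Int.floordiv (ceshkaA (2 * n) n) ((n : Int) + 1)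

def catalan_powers (x : Int) (numb : Int) : Int :=
  (((PySem.List.pyRange 0 numb 1).map
      (fun n => countedCatalanA n.toNat * x ^ n.toNat)).sum)

-- ===== PORT B =====
def catalan_powers_alt (x : Int) (numb : Int) : Int :=
  ((List.range numb.toNat).foldl
    (fun (s : Int × Int × Int) (n : Nat) =>
      (PySem.Int.floordiv (s.1 * 2 * (2 * (n : Int) + 1)) ((n : Int) + 2),
       s.2.1 * x,
       s.2.2 + s.1 * s.2.1))
    (1, 1, 0)).2.2

-- ===== PRECONDITION & SPEC =====
def Spec_catalan_powers (x : Int) (numb : Int) (out : Int) : Prop := out = catalan_powers_alt x numb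
instance (x : Int) (numb : Int) (out : Int) : Decidable (Spec_catalan_powers x numb out) := by unfold Spec_catalan_powers; infer_instance

-- ===== CLAIM (what is proved, stated in full; the proofs are below) =====
def Claim_equal_catalan_powers : Prop := ∀ (x : Int) (numb : Int), Dom_catalan_powers x numb → Spec_catalan_powers x numb (catalan_powers x numb)

-- ===== LEMMAS AND PROOFS =====

theorem factA_eq (n : Nat) : factA n = (n.factorial : Int) := by
  induction n with
  | zero => simp [factA, Nat.factorial]
  | succ m ih =>
    rw [factA, ih, Nat.factorial]
    push_cast; ring

theorem fd_exact (q b : Int) (hb : 0 < b) : PySem.Int.floordiv (q * b) b = q := by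
  rw [PySem.Int.floordiv_eq_ediv_of_pos hb]
  exact Int.mul_ediv_cancel _ (by omega)

theorem ceshkaA_central (n : Nat) : ceshkaA (2 * n) n = (Nat.centralBinom n : Int) := by
  unfold ceshkaA
  rw [factA_eq, factA_eq, factA_eq]
  have h2 : 2 * n - n = n := by omega
  rw [h2]
  have hfac : (2 * n).factorial = Nat.centralBinom n * (n.factorial * n.factorial) := by
    have h := Nat.choose_mul_factorial_mul_factorial (show n ≤ 2 * n by omega)
    rw [h2] at h
    rw [Nat.centralBinom, ← h]
    ring
  rw [hfac]
  push_cast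
  rw [fd_exact]
  positivity

theorem countedCatalanA_eq (n : Nat) : countedCatalanA n = (catalan n : Int) := by
  unfold countedCatalanA
  rw [ceshkaA_central]
  have h : (Nat.centralBinom n : Int) = (catalan n : Int) * ((n : Int) + 1) := by
    have := succ_mul_catalan_eq_centralBinom n
    push_cast [← this]; ring
  rw [h, fd_exact]
  positivity

-- the Catalan recurrence B's loop uses: (n+2) * C(n+1) = 2 * (2n+1) * C(n)
theorem catalan_step (n : Nat) :
    (catalan n : Int) * 2 * (2 * (n : Int) + 1) = (catalan (n + 1) : Int) * ((n : Int) + 2) := by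
  have h1 : ((n : Int) + 2) * (catalan (n + 1) : Int) = (Nat.centralBinom (n + 1) : Int) := by
    exact_mod_cast congrArg (Nat.cast : Nat → Int) (succ_mul_catalan_eq_centralBinom (n + 1))
  have h2 : ((n : Int) + 1) * (Nat.centralBinom (n + 1) : Int)
      = 2 * (2 * (n : Int) + 1) * (Nat.centralBinom n : Int) := by
    exact_mod_cast congrArg (Nat.cast : Nat → Int) (Nat.succ_mul_centralBinom_succ n)
  have h3 : ((n : Int) + 1) * (catalan n : Int) = (Nat.centralBinom n : Int) := by
    exact_mod_cast congrArg (Nat.cast : Nat → Int) (succ_mul_catalan_eq_centralBinom n)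
  have key : ((n : Int) + 1) *
      ((catalan n : Int) * 2 * (2 * (n : Int) + 1) - (catalan (n + 1) : Int) * ((n : Int) + 2)) = 0 := by
    linear_combination 2 * (2 * (n : Int) + 1) * h3 - ((n : Int) + 1) * h1 - h2
  have hne : ((n : Int) + 1) ≠ 0 := by positivity
  have := (mul_eq_zero.mp key).resolve_left hne
  linarith [this]

theorem foldB_invariant (x : Int) (k : Nat) :
    (List.range k).foldl
      (fun (s : Int × Int × Int) (n : Nat) =>
        (PySem.Int.floordiv (s.1 * 2 * (2 * (n : Int) + 1)) ((n : Int) + 2),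
         s.2.1 * x,
         s.2.2 + s.1 * s.2.1))
      (1, 1, 0)
    = ((catalan k : Int), x ^ k,
       ((List.range k).map (fun n => (catalan n : Int) * x ^ n)).sum) := by
  induction k with
  | zero => simp
  | succ m ih =>
    rw [List.range_succ, List.foldl_append, ih]
    simp only [List.foldl_cons, List.foldl_nil, List.map_append, List.map_cons,
      List.map_nil, List.sum_append, List.sum_cons, List.sum_nil]
    refine Prod.ext ?_ (Prod.ext ?_ ?_)
    · show PySem.Int.floordiv ((catalan m : Int) * 2 * (2 * (m : Int) + 1)) ((m : Int) + 2)
        = (catalan (m + 1) : Int)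
      rw [catalan_step, fd_exact]
      positivity
    · show x ^ m * x = x ^ (m + 1)
      rw [pow_succ]
    · show _ + (catalan m : Int) * x ^ m = _
      ring

theorem catalan_powers_eq_sum (x numb : Int) :
    catalan_powers x numb
      = ((List.range numb.toNat).map (fun n => (catalan n : Int) * x ^ n)).sum := by
  unfold catalan_powers
  rw [PySem.List.pyRange_one]
  simp only [sub_zero, List.map_map]
  congr 1
  apply List.map_congr_left
  intro k hk
  simp [countedCatalanA_eq]

-- ===== VERDICT (by name: the statement is the Claim_ definition above) =====
theorem catalan_powers_spec : Claim_equal_catalan_powers := by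
  intro x numb _
  show catalan_powers x numb = catalan_powers_alt x numb
  rw [catalan_powers_eq_sum]
  unfold catalan_powers_alt
  rw [foldB_invariant]
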